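-- pv_equiv track=rewrite | github.com/824zzy/Leetcode | A_Basic/Simulation/L0_2125_Number_of_Laser_Beams_in_a_Bank.py | numberOfBeams
-- ===== SOURCE A (Python) =====
-- from typing import List
--
-- def numberOfBeams(A: List[str]) -> int:
--     ans = 0
--     pre = 0
--     for i in range(len(A)):
--         if A[i].count('1'):
--             ans += pre * A[i].count('1')
--             pre = A[i].count('1')
--     return ans
-- ===== SOURCE B (Python) =====
-- from typing import List
--
-- def numberOfBeams(A: List[str]) -> int:
--     # Divide and conquer: each segment is summarized by
--     # (beams inside, first nonzero row count or 0, last nonzero row count or 0);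
--     # two halves merge with one cross term last(L) * first(R).
--     def solve(lo, hi):
--         if hi - lo == 0:
--             return (0, 0, 0)
--         if hi - lo == 1:
--             c = A[lo].count('1')
--             return (0, c, c)
--         mid = (lo + hi) // 2
--         bL, fL, lL = solve(lo, mid)
--         bR, fR, lR = solve(mid, hi)
--         return (bL + bR + lL * fR, fL if fL else fR, lR if lR else lL)
--     return solve(0, len(A))[0]
-- ===== Notes on version B (the rewrite author's own statement) =====
-- stated objective: alternative
-- what changed: Replaces A's left-to-right scan carrying the previous nonzero count with a divide-and-conquer: each half is summarized by (beams, first nonzero count, last nonzero count) and the halves merge with a single cross product last(L)*first(R).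
import Mathlib
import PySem

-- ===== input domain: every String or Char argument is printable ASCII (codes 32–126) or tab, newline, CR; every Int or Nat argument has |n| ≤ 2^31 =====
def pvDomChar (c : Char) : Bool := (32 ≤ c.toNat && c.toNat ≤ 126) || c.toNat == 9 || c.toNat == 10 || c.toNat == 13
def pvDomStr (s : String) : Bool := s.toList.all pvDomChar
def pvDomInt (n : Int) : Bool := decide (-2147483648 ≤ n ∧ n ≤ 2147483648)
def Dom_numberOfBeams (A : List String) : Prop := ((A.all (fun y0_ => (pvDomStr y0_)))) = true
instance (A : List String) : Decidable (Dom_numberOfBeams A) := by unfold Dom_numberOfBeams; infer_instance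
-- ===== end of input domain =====

-- B replaces A's left-to-right scan carrying the previous nonzero count with a
-- divide-and-conquer: each half is summarized by (beams, first nonzero count,
-- last nonzero count) and the halves merge with one cross product (objective:
-- alternative algorithm; same cost).

-- ===== PORT A =====
-- literal port: loop over range(len(A)), test A[i].count('1'), carry (ans, pre)
def numberOfBeams (A : List String) : Int :=
  (PySem.List.pyRange 0 (A.length : Int) 1).foldl
    (fun (st : Int × Int) i =>
      let c : Int := (PySem.Str.count (PySem.List.pyGetD A i "") "1" : Int)
      if c ≠ 0 then (st.1 + st.2 * c, c) else st)
    (0, 0) |>.1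

-- ===== PORT B =====
-- solve(lo, hi) on the segment [lo, hi) of A, transcribed as recursion on the
-- segment itself (take/drop at the midpoint); returns (beams, first, last).
def pvSolve : List String → Int × Int × Int
  | [] => (0, 0, 0)
  | [r] =>
    let c : Int := (PySem.Str.count r "1" : Int)
    (0, c, c)
  | r1 :: r2 :: t =>
    let l := r1 :: r2 :: t
    let m := l.length / 2
    let L := pvSolve (l.take m)
    let R := pvSolve (l.drop m)
    (L.1 + R.1 + L.2.2 * R.2.1,
     if L.2.1 ≠ 0 then L.2.1 else R.2.1,
     if R.2.2 ≠ 0 then R.2.2 else L.2.2)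
termination_by l => l.length
decreasing_by
  · simp [List.length_take]; omega
  · simp [List.length_drop]; omega


def numberOfBeams_alt (A : List String) : Int := (pvSolve A).1

-- ===== PRECONDITION & SPEC =====
def Spec_numberOfBeams (A : List String) (out : Int) : Prop := out = numberOfBeams_alt A
instance (A : List String) (out : Int) : Decidable (Spec_numberOfBeams A out) := by unfold Spec_numberOfBeams; infer_instance

-- ===== CLAIM (what is proved, stated in full; the proofs are below) =====
def Claim_equal_numberOfBeams : Prop := ∀ (A : List String), Dom_numberOfBeams A → Spec_numberOfBeams A (numberOfBeams A)

-- ===== LEMMAS AND PROOFS =====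

-- sum of adjacent products of (pre :: l)
def pvPP (pre : Int) : List Int → Int
  | [] => 0
  | c :: cs => pre * c + pvPP c cs

def pvCounts (A : List String) : List Int :=
  A.filterMap (fun r =>
    let c : Int := (PySem.Str.count r "1" : Int)
    if c ≠ 0 then some c else none)

theorem pvCounts_append (x y : List String) :
    pvCounts (x ++ y) = pvCounts x ++ pvCounts y := by
  simp [pvCounts]

theorem pvCounts_nonzero (l : List String) : ∀ c ∈ pvCounts l, c ≠ 0 := by
  intro c hc
  simp only [pvCounts, List.mem_filterMap] at hc
  obtain ⟨r, _, hr⟩ := hc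
  split at hr
  · next h => exact (Option.some.inj hr) ▸ h
  · exact absurd hr (by simp)

theorem pvPP_head (c : Int) (cs : List Int) :
    pvPP c cs = c * cs.headD 0 + pvPP 0 cs := by
  cases cs with
  | nil => simp [pvPP]
  | cons d ds => simp [pvPP]

theorem pvPP_append (x : List Int) : ∀ (pre : Int) (y : List Int),
    pvPP pre (x ++ y) = pvPP pre x + pvPP (x.getLastD pre) y := by
  induction x with
  | nil => intro pre y; simp [pvPP]
  | cons c cs ih =>
    intro pre y
    simp only [List.cons_append, pvPP, ih c y, List.getLastD_cons]
    ring

theorem pvPP_split (x y : List Int) :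
    pvPP 0 (x ++ y) = pvPP 0 x + pvPP 0 y + x.getLastD 0 * y.headD 0 := by
  rw [pvPP_append x 0 y, pvPP_head (x.getLastD 0) y]
  ring

theorem pvSolve_eq (l : List String) :
    pvSolve l = (pvPP 0 (pvCounts l), (pvCounts l).headD 0, (pvCounts l).getLastD 0) := by
  induction l using pvSolve.induct with
  | case1 => simp [pvSolve, pvCounts, pvPP]
  | case2 r =>
    simp only [pvSolve, pvCounts, List.filterMap_cons, List.filterMap_nil, PySem.Str.count]
    by_cases h : PySem.Chars.count r.toList ['1'] = 0
    · simp [h, pvPP]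
    · simp [h, pvPP]
  | case3 r1 r2 t l' m' ihL ihR =>
    rw [pvSolve]
    set m := (r1 :: r2 :: t).length / 2 with hm
    set l := r1 :: r2 :: t with hl
    rw [ihL, ihR]
    have hc : pvCounts l = pvCounts (l.take m) ++ pvCounts (l.drop m) := by
      conv_lhs => rw [← List.take_append_drop m l]
      exact pvCounts_append _ _
    set cx := pvCounts (l.take m) with hcx
    set cy := pvCounts (l.drop m) with hcy
    have hfirst : (if cx.headD 0 ≠ 0 then cx.headD 0 else cy.headD 0)
        = (pvCounts l).headD 0 := by
      rw [hc]
      cases hx : cx with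
      | nil => simp
      | cons a as =>
        have ha : a ≠ 0 := pvCounts_nonzero (l.take m) a (by rw [← hcx, hx]; simp)
        simp [ha]
    have hlast : (if cy.getLastD 0 ≠ 0 then cy.getLastD 0 else cx.getLastD 0)
        = (pvCounts l).getLastD 0 := by
      rw [hc]
      cases hy : cy with
      | nil => simp
      | cons b bs =>
        have hv : (b :: bs).getLast? = some ((b :: bs).getLast (by simp)) :=
          List.getLast?_eq_some_getLast (by simp)
        have hb : (b :: bs).getLast (by simp) ≠ 0 := by
          apply pvCounts_nonzero (l.drop m)
          rw [← hcy, hy]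
          exact List.getLast_mem _
        simp [hv, hb]
    refine Prod.ext ?_ (Prod.ext ?_ ?_) <;> simp only
    · rw [hc, pvPP_split]; try ring
    · exact hfirst
    · exact hlast

def pvStep : Int × Int → String → Int × Int := fun st r =>
  let c : Int := (PySem.Str.count r "1" : Int)
  if c ≠ 0 then (st.1 + st.2 * c, c) else st

theorem pvA_foldl (A : List String) : ∀ ans pre : Int,
    (A.foldl pvStep (ans, pre)).1 = ans + pvPP pre (pvCounts A) := by
  induction A with
  | nil => intro ans pre; simp [pvCounts, pvPP]
  | cons r rest ih =>
    intro ans pre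
    simp only [List.foldl_cons, pvCounts, List.filterMap_cons]
    by_cases h : PySem.Str.count r "1" = 0
    · simp only [pvStep, h, Nat.cast_zero, ne_eq, not_true_eq_false, if_false]
      exact ih ans pre
    · have hc : ((PySem.Str.count r "1" : Int)) ≠ 0 := by exact_mod_cast h
      simp only [pvStep, hc, ne_eq, not_false_eq_true, if_pos]
      rw [ih]
      simp only [pvCounts, pvPP, ne_eq]
      ring

-- ===== VERDICT (by name: the statement is the Claim_ definition above) =====
theorem numberOfBeams_spec : Claim_equal_numberOfBeams := by
  intro A _
  unfold Spec_numberOfBeams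
  have hA : numberOfBeams A = 0 + pvPP 0 (pvCounts A) := by
    unfold numberOfBeams
    rw [show (fun (st : Int × Int) (i : Int) =>
          let c : Int := (PySem.Str.count (PySem.List.pyGetD A i "") "1" : Int)
          if c ≠ 0 then (st.1 + st.2 * c, c) else st)
        = (fun acc j => pvStep acc (PySem.List.pyGetD A j "")) from rfl]
    rw [PySem.List.foldl_pyRange_zero_pyGetD' A "" pvStep ((0 : Int), (0 : Int))]
    exact pvA_foldl A 0 0
  have hB : numberOfBeams_alt A = pvPP 0 (pvCounts A) := by
    unfold numberOfBeams_alt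
    rw [pvSolve_eq]
  rw [hA, hB]; ring
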